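-- pv_equiv track=rewrite | github.com/ngm9/addhiraj | main3.py | timestamp_to_seconds
-- ===== SOURCE A (Python) =====
-- def timestamp_to_seconds(timestamp):
--     """
--     Converts a timestamp string to seconds. Handles HH:MM:SS, MM:SS, and even just SS formats.
--     """
--     parts = timestamp.split(':')
--     parts = [int(part) for part in parts]
--     if len(parts) == 3:
--         return parts[0] * 3600 + parts[1] * 60 + parts[2]
--     elif len(parts) == 2:
--         return parts[0] * 60 + parts[1]
--     elif len(parts) == 1:
--         return parts[0]
--     else:
--         raise ValueError("Timestamp format is incorrect, should be HH:MM:SS, MM:SS, or SS")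
-- ===== SOURCE B (Python) =====
-- def timestamp_to_seconds(timestamp):
--     """
--     Converts a timestamp string to seconds. Handles HH:MM:SS, MM:SS, and even just SS formats.
--     """
--     parts = [int(part) for part in timestamp.split(':')]
--     if len(parts) > 3:
--         raise ValueError("Timestamp format is incorrect, should be HH:MM:SS, MM:SS, or SS")
--     result = 0
--     for value in parts:
--         result = result * 60 + value
--     return result
-- ===== Notes on version B (the rewrite author's own statement) =====
-- stated objective: simpler
-- what changed: Replaces the per-length branch dispatch (3600/60 multipliers) with a single Horner-style fold result = result*60 + value over the parsed fields.
import Mathlib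
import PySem

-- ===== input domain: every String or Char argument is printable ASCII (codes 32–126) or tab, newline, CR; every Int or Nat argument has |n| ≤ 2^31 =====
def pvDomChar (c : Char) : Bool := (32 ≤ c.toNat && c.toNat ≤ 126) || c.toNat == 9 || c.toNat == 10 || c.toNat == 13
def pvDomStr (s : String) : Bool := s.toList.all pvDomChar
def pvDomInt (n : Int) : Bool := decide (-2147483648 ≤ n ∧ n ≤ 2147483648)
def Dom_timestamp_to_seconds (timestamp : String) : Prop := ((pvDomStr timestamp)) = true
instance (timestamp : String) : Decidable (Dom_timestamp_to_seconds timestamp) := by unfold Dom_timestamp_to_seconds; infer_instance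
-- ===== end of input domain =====

-- B replaces A's per-length branch dispatch with a single Horner fold (result = result*60 + value); objective: simpler.

-- ===== PORT A =====
def timestamp_to_seconds (timestamp : String) : Int :=
  let parts := (PySem.Str.split? timestamp ":").getD []
  let parts := parts.map (fun p => (PySem.Int.ofStr? p).getD 0)
  if parts.length = 3 then
    (PySem.List.pyGet? parts 0).getD 0 * 3600 + (PySem.List.pyGet? parts 1).getD 0 * 60
      + (PySem.List.pyGet? parts 2).getD 0
  else if parts.length = 2 then
    (PySem.List.pyGet? parts 0).getD 0 * 60 + (PySem.List.pyGet? parts 1).getD 0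
  else if parts.length = 1 then
    (PySem.List.pyGet? parts 0).getD 0
  else 0  -- Python raises ValueError here; excluded by Pre_

-- ===== PORT B =====
def timestamp_to_seconds_alt (timestamp : String) : Int :=
  let parts := ((PySem.Str.split? timestamp ":").getD []).map (fun p => (PySem.Int.ofStr? p).getD 0)
  if 3 < parts.length then 0  -- Python raises ValueError here; excluded by Pre_
  else parts.foldl (fun result value => result * 60 + value) 0

-- ===== PRECONDITION & SPEC =====
-- Pre_ excludes exactly the inputs on which A raises ValueError: a field that int() rejects,
-- or more than three colon-separated fields. (Python's split on a separator never yields an empty list, so 1 ≤ length always holds.)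
def Pre_timestamp_to_seconds (timestamp : String) : Prop :=
  let parts := (PySem.Str.split? timestamp ":").getD []
  (∀ p ∈ parts, (PySem.Int.ofStr? p).isSome = true) ∧ 1 ≤ parts.length ∧ parts.length ≤ 3
instance (timestamp : String) : Decidable (Pre_timestamp_to_seconds timestamp) := by unfold Pre_timestamp_to_seconds; infer_instance

def pvWitness_timestamp_to_seconds : String := "1:02:03"

def Spec_timestamp_to_seconds (timestamp : String) (out : Int) : Prop := out = timestamp_to_seconds_alt timestamp
instance (timestamp : String) (out : Int) : Decidable (Spec_timestamp_to_seconds timestamp out) := by unfold Spec_timestamp_to_seconds; infer_instance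

-- ===== CLAIM (what is proved, stated in full; the proofs are below) =====
def Claim_equal_timestamp_to_seconds : Prop := ∀ (timestamp : String), Dom_timestamp_to_seconds timestamp → Pre_timestamp_to_seconds timestamp → Spec_timestamp_to_seconds timestamp (timestamp_to_seconds timestamp)

-- ===== LEMMAS AND PROOFS =====

-- ===== VERDICT (by name: the statement is the Claim_ definition above) =====
theorem timestamp_to_seconds_spec : Claim_equal_timestamp_to_seconds := by
  intro timestamp _ hpre
  unfold Pre_timestamp_to_seconds at hpre
  obtain ⟨_, h1, h3⟩ := hpre
  unfold Spec_timestamp_to_seconds timestamp_to_seconds timestamp_to_seconds_alt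
  simp only [List.length_map]
  generalize (PySem.Str.split? timestamp ":").getD [] = raw at h1 h3 ⊢
  match raw, h1, h3 with
  | [a], _, _ => simp [PySem.List.pyGet?, PySem.List.pyIdx?]
  | [a, b], _, _ => simp [PySem.List.pyGet?, PySem.List.pyIdx?]
  | [a, b, c], _, _ => simp [PySem.List.pyGet?, PySem.List.pyIdx?]; ring
  | [], h1, _ => simp at h1
  | _ :: _ :: _ :: _ :: _, _, h3 => simp at h3; omega
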